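-- pv_equiv track=rewrite | github.com/Primer81/mtg_card_db | database/mtg_to_google_api.py | process_mtg_cards
-- ===== SOURCE A (Python) =====
-- from collections import OrderedDict
--
-- def process_mtg_cards(cards: list) -> list:
--     cards_by_name: OrderedDict[str, dict] = OrderedDict()
--
--     def __sort_by_name(card_: dict) -> str:
--         return card_["name"]
--     cards_sorted: list = sorted(cards, key=__sort_by_name)
--
--     for card in cards_sorted:
--         card_name = card["name"]
--         if card_name not in cards_by_name or card.get("imageUrl") is not None:
--             cards_by_name[card_name] = card
--
--     def __map_mtg_cards(card_: dict):
--         return dict(card_.items())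
--     return list(map(__map_mtg_cards, cards_by_name.values()))
-- ===== SOURCE B (Python) =====
-- def process_mtg_cards(cards: list) -> list:
--     groups: dict = {}
--     for card in cards:
--         groups.setdefault(card["name"], []).append(card)
--     result: list = []
--     for name in sorted(groups):
--         group = groups[name]
--         chosen = group[0]
--         for card in group:
--             if card.get("imageUrl") is not None:
--                 chosen = card
--         result.append(dict(chosen.items()))
--     return result
-- ===== Notes on version B (the rewrite author's own statement) =====
-- stated objective: alternative
-- what changed: B groups cards by name in one pass over the original order and picks each group's winner (last card with an imageUrl, else the first) in a separate selection pass over the sorted names, instead of A's stable pre-sort of all cards followed by a single order-dependent dict-dedup pass.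
import Mathlib
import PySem

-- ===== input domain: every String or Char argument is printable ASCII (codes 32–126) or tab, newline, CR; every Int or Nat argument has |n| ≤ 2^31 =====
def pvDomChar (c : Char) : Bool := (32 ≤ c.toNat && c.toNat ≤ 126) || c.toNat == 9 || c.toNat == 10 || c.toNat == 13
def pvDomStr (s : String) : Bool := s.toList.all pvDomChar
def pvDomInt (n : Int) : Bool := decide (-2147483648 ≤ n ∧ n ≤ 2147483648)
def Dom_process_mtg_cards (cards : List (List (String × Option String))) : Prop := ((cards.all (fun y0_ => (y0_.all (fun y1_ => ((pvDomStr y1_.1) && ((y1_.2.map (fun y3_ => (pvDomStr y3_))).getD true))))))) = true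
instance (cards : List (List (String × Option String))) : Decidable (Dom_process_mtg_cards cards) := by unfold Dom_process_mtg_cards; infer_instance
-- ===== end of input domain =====

-- B groups cards by name once in original order, then picks each group's winner in a separate pass
-- over sorted names, instead of A's pre-sort of all cards followed by an order-dependent dict dedup.

-- ===== PORT A =====
-- card["name"]: under Pre_ every card has a non-None "name" (and with ≤ 1 card the key's value
-- never influences the result), so the String-valued total form below is exact on Pre_.
def pvName (c : List (String × Option String)) : String :=
  ((List.lookup "name" c).getD none).getD ""

-- card.get("imageUrl") is not None  ⟺  the assoc list has "imageUrl" with a non-None value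
def pvHasImg (c : List (String × Option String)) : Bool :=
  match List.lookup "imageUrl" c with
  | some (some _) => true
  | _ => false

-- the body of A's for-loop over cards_sorted
def pvAStep (d : PySem.Dict String (List (String × Option String)))
    (card : List (String × Option String)) : PySem.Dict String (List (String × Option String)) :=
  if !d.contains (pvName card) || pvHasImg card then d.insert (pvName card) card else d

def process_mtg_cards (cards : List (List (String × Option String))) :
    List (List (String × Option String)) :=
  let cards_sorted := PySem.List.sorted cards (fun c => pvName c) false
  let cards_by_name := cards_sorted.foldl pvAStep PySem.Dict.empty
  -- dict(card_.items()) is an identity-copy on the association list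
  cards_by_name.values.map (fun card => card)

-- ===== PORT B =====
-- the inner 'chosen' loop of B: start at group[0], overwrite whenever the card has an image
def pvChoose (g : List (List (String × Option String))) : List (String × Option String) :=
  g.foldl (fun chosen card => if pvHasImg card then card else chosen) (g.headD [])

def process_mtg_cards_alt (cards : List (List (String × Option String))) :
    List (List (String × Option String)) :=
  let groups := cards.foldl
    (fun (g : PySem.Dict String (List (List (String × Option String)))) card =>
      g.modify (pvName card) [] (fun l => l ++ [card])) PySem.Dict.empty
  (PySem.List.sorted groups.keys (fun k => k) false).map
    (fun name => pvChoose (groups.getD name []))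

-- ===== PRECONDITION & SPEC =====
-- Pre_ = exactly where the Python A returns: every card must carry a "name" key (else KeyError in
-- the sort key), and as soon as two cards are compared no name may be None (else TypeError).
def Pre_process_mtg_cards (cards : List (List (String × Option String))) : Prop :=
  (∀ c ∈ cards, (List.lookup "name" c).isSome = true) ∧
  (cards.length ≤ 1 ∨ ∀ c ∈ cards, ((List.lookup "name" c).getD none).isSome = true)
instance (cards : List (List (String × Option String))) : Decidable (Pre_process_mtg_cards cards) := by
  unfold Pre_process_mtg_cards; infer_instance

def pvWitness_process_mtg_cards : (List (List (String × Option String))) :=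
  [[("name", some "Llanowar Elves"), ("imageUrl", none)],
   [("name", some "Llanowar Elves"), ("imageUrl", some "http://x/1.png")],
   [("name", some "Bear"), ("imageUrl", none)]]

def Spec_process_mtg_cards (cards : List (List (String × Option String))) (out : List (List (String × Option String))) : Prop := out = process_mtg_cards_alt cards
instance (cards : List (List (String × Option String))) (out : List (List (String × Option String))) : Decidable (Spec_process_mtg_cards cards out) := by unfold Spec_process_mtg_cards; infer_instance

-- ===== CLAIM (what is proved, stated in full; the proofs are below) =====
def Claim_equal_process_mtg_cards : Prop := ∀ (cards : List (List (String × Option String))), Dom_process_mtg_cards cards → Pre_process_mtg_cards cards → Spec_process_mtg_cards cards (process_mtg_cards cards)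

-- ===== LEMMAS AND PROOFS =====

lemma pvChoose_append_img {g : List (List (String × Option String))}
    {x : List (String × Option String)} (h : pvHasImg x = true) :
    pvChoose (g ++ [x]) = x := by
  simp [pvChoose, List.foldl_append, h]

lemma pvChoose_append_noimg {g : List (List (String × Option String))}
    {x : List (String × Option String)} (h : pvHasImg x = false) (hg : g ≠ []) :
    pvChoose (g ++ [x]) = pvChoose g := by
  cases g with
  | nil => exact absurd rfl hg
  | cons a g' => simp [pvChoose, List.foldl_append, h]

lemma pvChoose_singleton (x : List (String × Option String)) : pvChoose [x] = x := by
  cases h : pvHasImg x <;> simp [pvChoose, h]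


lemma pvAFold_items (xs : List (List (String × Option String))) :
    (xs.foldl pvAStep PySem.Dict.empty).items
      = (PySem.Set.ofList (xs.map pvName)).map
          (fun n => (n, pvChoose (xs.filter (fun c => pvName c == n)))) := by
  induction xs using List.reverseRecOn with
  | nil => simp [PySem.Dict.empty, PySem.Set.ofList]
  | append_singleton xs x ih =>
    rw [List.foldl_append, List.foldl_cons, List.foldl_nil]
    have hkeys : (xs.foldl pvAStep PySem.Dict.empty).keys = PySem.Set.ofList (xs.map pvName) := by
      simp [PySem.Dict.keys, ih, List.map_map, Function.comp_def]
    have hcont : (xs.foldl pvAStep PySem.Dict.empty).contains (pvName x)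
        = decide (pvName x ∈ PySem.Set.ofList (xs.map pvName)) := by
      rw [PySem.Dict.contains_eq_decide_mem_keys, hkeys]
    by_cases hmem : pvName x ∈ PySem.Set.ofList (xs.map pvName)
    · -- existing key
      have hxs : ∃ c ∈ xs, pvName c = pvName x := by
        simpa [PySem.Set.mem_ofList] using hmem
      have hofl : PySem.Set.ofList ((xs ++ [x]).map pvName) = PySem.Set.ofList (xs.map pvName) := by
        rw [List.map_append, List.map_cons, List.map_nil, PySem.Set.ofList_append_singleton,
          PySem.Set.add_of_mem hmem]
      by_cases himg : pvHasImg x = true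
      · -- overwrite
        rw [pvAStep, if_pos (by rw [himg]; simp)]
        rw [PySem.Dict.items_insert_of_contains _ _ (by rw [hcont]; simpa using hmem)]
        rw [ih, hofl, List.map_map]
        apply List.map_congr_left
        intro n hn
        simp only [Function.comp_apply, List.filter_append, List.filter_cons, List.filter_nil]
        by_cases hne : pvName x = n
        · subst hne
          simp [pvChoose_append_img himg]
        · have hb : (pvName x == n) = false := by simpa using hne
          simp [hb, Ne.symm hne]
      · -- skip
        have himgf : pvHasImg x = false := by simpa using himg
        rw [pvAStep, if_neg (by rw [hcont, himgf]; simpa using hmem)]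
        rw [ih, hofl]
        apply List.map_congr_left
        intro n hn
        simp only [List.filter_append, List.filter_cons, List.filter_nil]
        by_cases hne : pvName x = n
        · subst hne
          have hgne : xs.filter (fun c => pvName c == pvName x) ≠ [] := by
            rcases hxs with ⟨c, hc, hcn⟩
            intro hnil
            have hcm : c ∈ xs.filter (fun c => pvName c == pvName x) :=
              List.mem_filter.mpr ⟨hc, by simpa using hcn⟩
            rw [hnil] at hcm; exact absurd hcm (List.not_mem_nil)
          simp only [beq_self_eq_true, if_pos]
          rw [pvChoose_append_noimg himgf hgne]
        · have hb : (pvName x == n) = false := by simpa using hne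
          simp [hb]
    · -- new key
      have hmem' : ∀ c ∈ xs, pvName c ≠ pvName x := by
        simpa [PySem.Set.mem_ofList] using hmem
      rw [pvAStep, if_pos (by rw [hcont]; simp [hmem])]
      rw [PySem.Dict.items_insert_of_not_contains _ _ (by rw [hcont]; simpa using hmem)]
      rw [ih]
      rw [List.map_append, List.map_cons, List.map_nil, PySem.Set.ofList_append_singleton,
        PySem.Set.add_of_not_mem hmem, List.map_append]
      have hnil : xs.filter (fun c => pvName c == pvName x) = [] := by
        rw [List.filter_eq_nil_iff]
        intro c hc
        simpa using hmem' c hc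
      congr 1
      · apply List.map_congr_left
        intro n hn
        have hne : pvName x ≠ n := by
          intro h; exact hmem (h ▸ hn)
        have hb : (pvName x == n) = false := by simpa using hne
        simp [List.filter_append, hb]
      · simp [List.filter_append, hnil, pvChoose_singleton]

lemma pvGroups_getD_pf (cards : List (List (String × Option String))) (n : String) :
    (cards.foldl
      (fun (g : PySem.Dict String (List (List (String × Option String)))) card =>
        g.modify (pvName card) [] (fun l => l ++ [card])) PySem.Dict.empty).getD n []
      = cards.filter (fun c => pvName c == n) := by
  induction cards using List.reverseRecOn with
  | nil => simp
  | append_singleton xs x ih =>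
    rw [List.foldl_append, List.filter_append]
    simp only [List.foldl_cons, List.foldl_nil]
    rw [PySem.Dict.getD_modify]
    by_cases h : n = pvName x
    · subst h; rw [if_pos rfl, ih]; simp
    · rw [if_neg h, ih]; simp [Ne.symm h]

lemma pvGroups_keys_pf (cards : List (List (String × Option String))) :
    (cards.foldl
      (fun (g : PySem.Dict String (List (List (String × Option String)))) card =>
        g.modify (pvName card) [] (fun l => l ++ [card])) PySem.Dict.empty).keys
      = PySem.Set.ofList (cards.map pvName) := by
  rw [PySem.Dict.keys_foldl_modify_key cards pvName [] (fun _ card => (fun l => l ++ [card]))]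
  simp [PySem.Set.update_nil_left]

lemma pvOfList_sublist_pf (l : List String) : (PySem.Set.ofList l).Sublist l := by
  induction l using List.reverseRecOn with
  | nil => simp [PySem.Set.ofList]
  | append_singleton xs x ih =>
    rw [PySem.Set.ofList_append_singleton, PySem.Set.add_eq_ite]
    split
    · exact ih.trans (List.sublist_append_left xs [x])
    · exact ih.append (List.Sublist.refl [x])

lemma pvFilter_insertBy (n : String) (ys : List (List (String × Option String)))
    (hs : ys.Pairwise (fun a b => pvName a ≤ pvName b)) (x : List (String × Option String)) :
    (PySem.List.insertBy (fun a b => decide (pvName a < pvName b)) x ys).filter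
        (fun c => pvName c == n)
      = ys.filter (fun c => pvName c == n) ++ (if pvName x == n then [x] else []) := by
  induction ys with
  | nil => simp [PySem.List.insertBy]; split <;> simp_all
  | cons y ys ih =>
    rw [List.pairwise_cons] at hs
    simp only [PySem.List.insertBy]
    by_cases hlt : pvName x < pvName y
    · rw [if_pos (by simpa using hlt)]
      by_cases hx : pvName x = n
      · have hnil : (y :: ys).filter (fun c => pvName c == n) = [] := by
          rw [List.filter_eq_nil_iff]
          intro c hc
          simp only [beq_iff_eq]
          intro h
          have hyc : pvName y ≤ pvName c := by
            rcases List.mem_cons.mp hc with rfl | hc'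
            · exact le_refl _
            · exact hs.1 c hc'
          rw [hx] at hlt; rw [h] at hyc
          exact absurd (lt_of_lt_of_le hlt hyc) (lt_irrefl n)
        rw [hnil]
        simp [hx, hnil]
      · simp only [List.filter_cons, beq_iff_eq, hx]
        simp
    · rw [if_neg (by simpa using hlt)]
      rw [List.filter_cons, List.filter_cons, ih hs.2]
      split <;> simp

lemma pvFilter_sorted (xs : List (List (String × Option String))) (n : String) :
    (PySem.List.sorted xs (fun c => pvName c) false).filter (fun c => pvName c == n)
      = xs.filter (fun c => pvName c == n) := by
  induction xs using List.reverseRecOn with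
  | nil => simp [PySem.List.sorted]
  | append_singleton xs x ih =>
    rw [PySem.List.sorted_eq_foldl_insertBy, List.foldl_append, List.foldl_cons, List.foldl_nil,
      ← PySem.List.sorted_eq_foldl_insertBy,
      pvFilter_insertBy n _ (PySem.List.sorted_pairwise xs (fun c => pvName c)) x, ih,
      List.filter_append]
    simp [List.filter_cons]

lemma pv_main (cards : List (List (String × Option String))) :
    process_mtg_cards cards = process_mtg_cards_alt cards := by
  have hA : process_mtg_cards cards
      = (PySem.Set.ofList ((PySem.List.sorted cards (fun c => pvName c) false).map pvName)).map
          (fun n => pvChoose (cards.filter (fun c => pvName c == n))) := by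
    simp only [process_mtg_cards, PySem.Dict.values, pvAFold_items, List.map_map]
    apply List.map_congr_left
    intro n hn
    simp [Function.comp_def, pvFilter_sorted]
  have hB : process_mtg_cards_alt cards
      = (PySem.List.sorted (PySem.Set.ofList (cards.map pvName)) (fun k => k) false).map
          (fun n => pvChoose (cards.filter (fun c => pvName c == n))) := by
    simp only [process_mtg_cards_alt, pvGroups_keys_pf, pvGroups_getD_pf]
  rw [hA, hB]
  have hnodA : ((PySem.Set.ofList ((PySem.List.sorted cards (fun c => pvName c) false).map pvName))).Nodup :=
    PySem.Set.nodup_ofList _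
  have hperm : ((PySem.Set.ofList ((PySem.List.sorted cards (fun c => pvName c) false).map pvName))).Perm
      (PySem.Set.ofList (cards.map pvName)) := by
    rw [List.perm_ext_iff_of_nodup hnodA (PySem.Set.nodup_ofList _)]
    intro a
    simp [PySem.Set.mem_ofList, PySem.List.mem_sorted]
  have hle : ((PySem.Set.ofList ((PySem.List.sorted cards (fun c => pvName c) false).map pvName))).Pairwise (· ≤ ·) :=
    (PySem.List.sorted_map_key_pairwise cards (fun c => pvName c)).sublist (pvOfList_sublist_pf _)
  have hlt : ((PySem.Set.ofList ((PySem.List.sorted cards (fun c => pvName c) false).map pvName))).Pairwise (· < ·) := by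
    have := List.Pairwise.and hle hnodA
    exact this.imp (fun h => lt_of_le_of_ne h.1 h.2)
  rw [PySem.List.sorted_eq_of_perm_of_pairwise_lt _ _ _ hperm hlt]

-- ===== VERDICT (by name: the statement is the Claim_ definition above) =====
theorem process_mtg_cards_spec : Claim_equal_process_mtg_cards := by
  intro cards _ _
  unfold Spec_process_mtg_cards
  exact pv_main cards
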